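-- pv_equiv track=rewrite | github.com/hujbrown/CSE138_Assignment4 | outline.py | compare_vclocks
-- ===== SOURCE A (Python) =====
-- def compare_vclocks(sender_clock, receiver_clock):
--     # Check that for the keys the client has
--         # The receiver has the client's keys
--         # The receiver is allowed to have more keys than the client
--     replicas_from_sender = list(sender_clock.keys())
--     replicas_in_receiver = list(receiver_clock.keys())
--     if not all(x in replicas_in_receiver for x in replicas_from_sender):
--         return False
--     # Check that for the matching key
--     for replica in sender_clock:
--         if not sender_clock[replica] <= receiver_clock[replica]:
--             return False
--     return True
-- ===== SOURCE B (Python) =====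
-- def compare_vclocks(sender_clock, receiver_clock):
--     # Dominance via the join: sender_clock is dominated by receiver_clock
--     # exactly when merging the two clocks pointwise by max changes nothing,
--     # i.e. the merged clock equals the receiver clock.
--     merged = dict(receiver_clock)
--     for replica, count in sender_clock.items():
--         merged[replica] = max(merged.get(replica, count), count)
--     return merged == receiver_clock
-- ===== Notes on version B (the rewrite author's own statement) =====
-- stated objective: alternative
-- what changed: Instead of A's subset check over the key list followed by a per-key comparison loop, B uses the join characterization of vector-clock dominance: it builds the pointwise max-merge of the two clocks in one pass and returns whether the merged clock equals the receiver clock.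
import Mathlib
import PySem

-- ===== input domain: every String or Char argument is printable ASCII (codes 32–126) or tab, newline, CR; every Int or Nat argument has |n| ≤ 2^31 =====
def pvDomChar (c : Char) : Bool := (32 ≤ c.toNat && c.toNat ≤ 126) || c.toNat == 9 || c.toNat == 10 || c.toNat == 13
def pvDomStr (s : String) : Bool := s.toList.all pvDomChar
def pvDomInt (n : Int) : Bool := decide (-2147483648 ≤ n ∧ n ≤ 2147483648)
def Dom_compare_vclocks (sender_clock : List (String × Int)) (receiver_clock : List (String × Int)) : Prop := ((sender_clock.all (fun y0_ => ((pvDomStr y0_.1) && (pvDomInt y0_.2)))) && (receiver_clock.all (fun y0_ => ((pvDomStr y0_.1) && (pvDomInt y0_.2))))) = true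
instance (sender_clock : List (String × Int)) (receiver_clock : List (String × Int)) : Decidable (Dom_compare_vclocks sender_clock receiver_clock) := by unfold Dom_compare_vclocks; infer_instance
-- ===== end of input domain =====

-- B replaces A's subset-check-then-compare passes by the join characterization of
-- vector-clock dominance: build the pointwise max-merge of the two clocks and test
-- whether it equals the receiver clock (objective: alternative algorithm).

-- ===== PORT A =====
-- second pass of A: for replica in sender_clock: if not sender_clock[replica] <= receiver_clock[replica]: return False
def pvA_values (keys : List String) (sd rd : PySem.Dict String Int) : Bool :=
  match keys with
  | [] => true
  | k :: rest =>
      match sd.get? k, rd.get? k with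
      | some sv, some rv => if ¬ (sv ≤ rv) then false else pvA_values rest sd rd
      | _, _ => false   -- KeyError in Python; unreachable here (keys come from sd, membership in rd was checked)

def compare_vclocks (sender_clock : List (String × Int)) (receiver_clock : List (String × Int)) : Bool :=
  let sd := PySem.Dict.ofList sender_clock
  let rd := PySem.Dict.ofList receiver_clock
  let replicas_from_sender := sd.keys
  let replicas_in_receiver := rd.keys
  if ¬ (replicas_from_sender.all (fun x => replicas_in_receiver.contains x)) then false
  else pvA_values replicas_from_sender sd rd

-- ===== PORT B =====
-- merged = dict(receiver_clock); for replica, count in sender_clock.items(): merged[replica] = max(merged.get(replica, count), count)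
def pvMerge (items : List (String × Int)) (rd : PySem.Dict String Int) : PySem.Dict String Int :=
  items.foldl (fun m p => m.insert p.1 (max (m.getD p.1 p.2) p.2)) rd

-- exact port of Python's 'merged == receiver_clock' (dict == ignores order): since
-- both dicts have unique keys, equal sizes plus every item of d1 looking up in d2 is set equality
def pvDictEq (d1 d2 : PySem.Dict String Int) : Bool :=
  d1.size == d2.size && d1.items.all (fun p => d2.get? p.1 == some p.2)

def compare_vclocks_alt (sender_clock : List (String × Int)) (receiver_clock : List (String × Int)) : Bool :=
  let rd := PySem.Dict.ofList receiver_clock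
  pvDictEq (pvMerge (PySem.Dict.ofList sender_clock).items rd) rd

-- ===== PRECONDITION & SPEC =====
def Spec_compare_vclocks (sender_clock : List (String × Int)) (receiver_clock : List (String × Int)) (out : Bool) : Prop := out = compare_vclocks_alt sender_clock receiver_clock
instance (sender_clock : List (String × Int)) (receiver_clock : List (String × Int)) (out : Bool) : Decidable (Spec_compare_vclocks sender_clock receiver_clock out) := by unfold Spec_compare_vclocks; infer_instance

-- ===== CLAIM (what is proved, stated in full; the proofs are below) =====
def Claim_equal_compare_vclocks : Prop := ∀ (sender_clock : List (String × Int)) (receiver_clock : List (String × Int)), Dom_compare_vclocks sender_clock receiver_clock → Spec_compare_vclocks sender_clock receiver_clock (compare_vclocks sender_clock receiver_clock)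

-- ===== LEMMAS AND PROOFS =====
-- the common functional content: key present in receiver and value dominated
def pvCheck (rd : PySem.Dict String Int) (p : String × Int) : Bool :=
  match rd.get? p.1 with
  | none => false
  | some rv => decide (p.2 ≤ rv)

-- ---- A-side: A's result is the conjunction of pvCheck over sender items ----
theorem pvA_values_eq_all (L : List (String × Int)) (sd rd : PySem.Dict String Int)
    (h : ∀ p ∈ L, sd.get? p.1 = some p.2) :
    pvA_values (L.map (·.1)) sd rd = L.all (pvCheck rd) := by
  induction L with
  | nil => rfl
  | cons p rest ih =>
      obtain ⟨k, v⟩ := p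
      have hk : sd.get? k = some v := h (k, v) (by simp)
      simp only [List.map_cons, pvA_values, hk, List.all_cons, pvCheck]
      cases hr : rd.get? k with
      | none => simp
      | some rv =>
          by_cases hle : v ≤ rv
          · simp [hle, ih (fun q hq => h q (by simp [hq]))]
          · simp [hle]

theorem pvAll_false_of_missing (sd rd : PySem.Dict String Int)
    (h : sd.keys.all (fun x => rd.keys.contains x) = false) :
    sd.items.all (pvCheck rd) = false := by
  rw [List.all_eq_false] at h ⊢
  obtain ⟨k, hk, hkc⟩ := h
  have hkeys : k ∈ sd.items.map (·.1) := hk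
  obtain ⟨p, hp, hpk⟩ := List.mem_map.mp hkeys
  refine ⟨p, hp, ?_⟩
  have hnone : rd.get? p.1 = none := by
    apply (PySem.Dict.get?_eq_none_iff_not_mem_keys rd p.1).mpr
    rw [hpk]
    simpa using hkc
  simp [pvCheck, hnone]

theorem pvA_eq_all (s r : List (String × Int)) :
    compare_vclocks s r
      = (PySem.Dict.ofList s).items.all (pvCheck (PySem.Dict.ofList r)) := by
  unfold compare_vclocks
  set sd := PySem.Dict.ofList s with hsd
  set rd := PySem.Dict.ofList r with hrd
  have hmem : ∀ p ∈ sd.items, sd.get? p.1 = some p.2 := by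
    intro p hp
    exact PySem.Dict.get?_of_mem_items sd hp (PySem.Dict.nodup_keys_ofList s)
  have hA : pvA_values sd.keys sd rd = sd.items.all (pvCheck rd) := by
    have : sd.keys = sd.items.map (·.1) := rfl
    rw [this]
    exact pvA_values_eq_all sd.items sd rd hmem
  by_cases hall : sd.keys.all (fun x => rd.keys.contains x) = true
  · rw [if_neg (by simpa using hall)]
    exact hA
  · have hf : sd.keys.all (fun x => rd.keys.contains x) = false :=
      Bool.eq_false_iff.mpr hall
    rw [if_pos (by simpa using hf)]
    exact (pvAll_false_of_missing sd rd hf).symm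

-- ---- B-side: lookups in the merged clock ----
theorem pvMerge_get?_of_not_mem (L : List (String × Int)) (k : String)
    (hk : k ∉ L.map Prod.fst) :
    ∀ rd : PySem.Dict String Int, (pvMerge L rd).get? k = rd.get? k := by
  induction L with
  | nil => intro rd; rfl
  | cons p rest ih =>
      intro rd
      simp only [List.map_cons, List.mem_cons, not_or] at hk
      simp only [pvMerge, List.foldl_cons]
      rw [show (rest.foldl (fun m q => m.insert q.1 (max (m.getD q.1 q.2) q.2))
            (rd.insert p.1 (max (rd.getD p.1 p.2) p.2)))
          = pvMerge rest (rd.insert p.1 (max (rd.getD p.1 p.2) p.2)) from rfl]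
      rw [ih hk.2]
      exact PySem.Dict.get?_insert_of_ne _ _ hk.1

theorem pvMerge_get?_of_mem (L : List (String × Int)) (k : String) (v : Int)
    (hnd : (L.map Prod.fst).Nodup) (hm : (k, v) ∈ L) :
    ∀ rd : PySem.Dict String Int,
      (pvMerge L rd).get? k = some (max (rd.getD k v) v) := by
  induction L with
  | nil => cases hm
  | cons p rest ih =>
      intro rd
      simp only [List.map_cons, List.nodup_cons] at hnd
      simp only [pvMerge, List.foldl_cons]
      rw [show (rest.foldl (fun m q => m.insert q.1 (max (m.getD q.1 q.2) q.2))
            (rd.insert p.1 (max (rd.getD p.1 p.2) p.2)))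
          = pvMerge rest (rd.insert p.1 (max (rd.getD p.1 p.2) p.2)) from rfl]
      rcases List.mem_cons.mp hm with heq | hrest
      · obtain ⟨k0, v0⟩ := p
        have hk : k = k0 := congrArg Prod.fst heq
        have hv : v = v0 := congrArg Prod.snd heq
        subst hk; subst hv
        rw [pvMerge_get?_of_not_mem rest k hnd.1]
        rw [PySem.Dict.get?_insert_self]
      · have hkne : k ≠ p.1 := by
          intro hc
          exact hnd.1 (hc ▸ List.mem_map.mpr ⟨(k, v), hrest, by rw [hc]⟩)
        rw [ih hnd.2 hrest]
        simp [PySem.Dict.getD_insert, hkne]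

theorem pvInsert_same (d : PySem.Dict String Int) (k : String) (v : Int)
    (hnd : d.keys.Nodup) (h : d.get? k = some v) : d.insert k v = d := by
  apply PySem.Dict.ext
  have hc : d.contains k = true := by
    rw [PySem.Dict.contains_eq_isSome_get?, h]; rfl
  rw [PySem.Dict.items_insert_of_contains _ _ hc]
  have hcong : ∀ p ∈ d.items,
      (if (p.1 == k) = true then (k, v) else p) = id p := by
    intro p hp
    by_cases hpk : (p.1 == k) = true
    · have hk1 : p.1 = k := by simpa using hpk
      have hg : d.get? p.1 = some p.2 := PySem.Dict.get?_of_mem_items d hp hnd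
      rw [hk1] at hg
      have hv : p.2 = v := by rw [hg] at h; exact Option.some_inj.mp h
      simp only [hpk, if_pos, id]
      exact Prod.ext hk1.symm hv.symm
    · simp [hpk]
  rw [List.map_congr_left hcong, List.map_id]

theorem pvMerge_id (L : List (String × Int)) (rd : PySem.Dict String Int)
    (hnd : rd.keys.Nodup)
    (h : ∀ p ∈ L, ∃ rv, rd.get? p.1 = some rv ∧ p.2 ≤ rv) :
    pvMerge L rd = rd := by
  induction L with
  | nil => rfl
  | cons p rest ih =>
      obtain ⟨rv, hget, hle⟩ := h p (by simp)
      simp only [pvMerge, List.foldl_cons]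
      have hd : rd.getD p.1 p.2 = rv := PySem.Dict.getD_of_get?_eq_some _ _ hget
      have hmax : max (rd.getD p.1 p.2) p.2 = rv := by rw [hd]; omega
      rw [hmax, pvInsert_same rd p.1 rv hnd hget]
      exact ih (fun q hq => h q (by simp [hq]))

theorem pvB_eq_all (s r : List (String × Int)) :
    compare_vclocks_alt s r
      = (PySem.Dict.ofList s).items.all (pvCheck (PySem.Dict.ofList r)) := by
  show pvDictEq (pvMerge (PySem.Dict.ofList s).items (PySem.Dict.ofList r))
      (PySem.Dict.ofList r) = _
  set sd := PySem.Dict.ofList s with hsd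
  set rd := PySem.Dict.ofList r with hrd
  have hnds : sd.keys.Nodup := PySem.Dict.nodup_keys_ofList s
  have hndr : rd.keys.Nodup := PySem.Dict.nodup_keys_ofList r
  have hndsi : (sd.items.map Prod.fst).Nodup := hnds
  by_cases hall : sd.items.all (pvCheck rd) = true
  · rw [hall]
    have hmerge : pvMerge sd.items rd = rd := by
      apply pvMerge_id _ _ hndr
      intro p hp
      have := List.all_eq_true.mp hall p hp
      unfold pvCheck at this
      cases hg : rd.get? p.1 with
      | none => rw [hg] at this; cases this
      | some rv =>
          rw [hg] at this
          exact ⟨rv, rfl, by simpa using this⟩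
    rw [hmerge]
    unfold pvDictEq
    simp only [beq_self_eq_true, Bool.true_and]
    apply List.all_eq_true.mpr
    intro p hp
    simp [PySem.Dict.get?_of_mem_items rd hp hndr]
  · have hf : sd.items.all (pvCheck rd) = false := Bool.eq_false_iff.mpr hall
    rw [hf]
    obtain ⟨p, hp, hpf⟩ := List.all_eq_false.mp hf
    have hget : (pvMerge sd.items rd).get? p.1
        = some (max (rd.getD p.1 p.2) p.2) := by
      have hmm : (p.1, p.2) ∈ sd.items := by cases p; exact hp
      exact pvMerge_get?_of_mem sd.items p.1 p.2 hndsi hmm rd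
    unfold pvCheck at hpf
    unfold pvDictEq
    apply Bool.and_eq_false_iff.mpr
    right
    apply List.all_eq_false.mpr
    cases hg : rd.get? p.1 with
    | none =>
        have hd : rd.getD p.1 p.2 = p.2 := PySem.Dict.getD_of_get?_eq_none _ _ hg
        have hm : (pvMerge sd.items rd).get? p.1 = some p.2 := by
          rw [hget, hd]; simp
        refine ⟨(p.1, p.2), PySem.Dict.mem_items_of_get?_eq_some _ hm, ?_⟩
        simp [hg]
    | some rv =>
        rw [hg] at hpf
        have hlt : rv < p.2 := by
          by_contra hc
          simp [not_lt] at hc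
          simp [hc] at hpf
        have hd : rd.getD p.1 p.2 = rv := PySem.Dict.getD_of_get?_eq_some _ _ hg
        have hm : (pvMerge sd.items rd).get? p.1 = some p.2 := by
          rw [hget, hd]
          congr 1
          omega
        refine ⟨(p.1, p.2), PySem.Dict.mem_items_of_get?_eq_some _ hm, ?_⟩
        simp [hg]
        omega

-- ===== VERDICT (by name: the statement is the Claim_ definition above) =====
theorem compare_vclocks_spec : Claim_equal_compare_vclocks := by
  intro s r _
  unfold Spec_compare_vclocks
  rw [pvA_eq_all, pvB_eq_all]
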